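-- pv_equiv track=rewrite | github.com/Paul-Marie/Epitech-Survival-Kit | Mathematics/Projects/102cipher/bonus/cipher_fin.py | aff_ph
-- ===== SOURCE A (Python) =====
-- def     aff_ph(ph, nb, nbr, sent):
--     i = 0
--     j = 0
--     k = 0
--     while (i < nbr):
--         if (len(ph) != nbr):
--             ph.append([])
--         while (j < nb and k < len(sent)):
--             ph[i].append(ord(sent[k]))
--             j = j + 1
--             k = k + 1;
--         i = i + 1
--         j = 0;
--     if (len(ph[i - 1]) != nb):
--         while (len(ph[i - 1]) < nb):
--             ph[i - 1].append(0)
--     return ph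
-- ===== SOURCE B (Python) =====
-- def aff_ph(ph, nb, nbr, sent):
--     k = 0
--     for i in range(nbr):
--         if len(ph) != nbr:
--             ph.append([])
--         chunk = sent[k:k + max(nb, 0)]
--         ph[i].extend(ord(c) for c in chunk)
--         k += len(chunk)
--     last = ph[nbr - 1]
--     if len(last) < nb:
--         last.extend([0] * (nb - len(last)))
--     return ph
-- ===== Notes on version B (the rewrite author's own statement) =====
-- stated objective: simpler
-- what changed: Replaced the char-by-char double while loop with shared counters i/j/k by a single for-loop over range(nbr) that appends a whole slice sent[k:k+nb] per row and pads the last row with one bulk extend.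
-- outside the precondition, e.g. on aff_ph([[1], [2]], 2, -1, 'x'): A returns [[1], [2, 0]], B returns [[1, 0], [2]]
import Mathlib
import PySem

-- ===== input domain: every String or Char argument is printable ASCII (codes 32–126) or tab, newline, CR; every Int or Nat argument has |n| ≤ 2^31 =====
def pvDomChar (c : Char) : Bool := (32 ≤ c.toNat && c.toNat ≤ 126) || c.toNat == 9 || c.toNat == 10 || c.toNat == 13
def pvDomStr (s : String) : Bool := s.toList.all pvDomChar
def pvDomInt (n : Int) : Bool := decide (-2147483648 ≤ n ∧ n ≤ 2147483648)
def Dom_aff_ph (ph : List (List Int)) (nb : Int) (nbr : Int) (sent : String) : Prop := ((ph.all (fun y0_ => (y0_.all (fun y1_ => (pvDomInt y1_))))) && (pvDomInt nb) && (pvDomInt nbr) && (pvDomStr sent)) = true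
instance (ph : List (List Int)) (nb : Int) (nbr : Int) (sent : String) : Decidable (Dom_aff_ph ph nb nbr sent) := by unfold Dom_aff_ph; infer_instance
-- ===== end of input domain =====

-- B replaces A's char-by-char double while loop (shared counters i/j/k) by one for-loop over
-- range(nbr) that extends each row with the whole slice sent[k:k+nb] and bulk-pads the last row;
-- objective: simpler. Both A and B mutate `ph` in place identically (the returned list IS the
-- mutated argument in both); the theorems are about the returned value.

-- ===== PORT A =====
-- inner `while (j < nb and k < len(sent)): ph[i].append(ord(sent[k])); j += 1; k += 1`
def affA_inner (ph : List (List Int)) (i : Nat) (nb : Int) (j : Int) (k : Nat) (s : List Char) :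
    List (List Int) × Nat :=
  if h : j < nb ∧ k < s.length then
    affA_inner (ph.modify i (fun row => row ++ [((s[k]'h.2).toNat : Int)])) i nb (j + 1) (k + 1) s
  else (ph, k)
termination_by s.length - k
decreasing_by omega

-- final `while (len(ph[i-1]) < nb): ph[i-1].append(0)`
def affA_pad (row : List Int) (nb : Int) : List Int :=
  if h : (row.length : Int) < nb then affA_pad (row ++ [0]) nb else row
termination_by (nb - row.length).toNat
decreasing_by simp; omega

-- outer `while (i < nbr)` carrying (ph, i, k); j restarts at 0 each iteration
def affA_outer (ph : List (List Int)) (nb : Int) (nbr : Int) (s : List Char) (i : Nat) (k : Nat) :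
    List (List Int) × Nat × Nat :=
  if h : (i : Int) < nbr then
    let ph1 := if (ph.length : Int) ≠ nbr then ph ++ [([] : List Int)] else ph
    let r := affA_inner ph1 i nb 0 k s
    affA_outer r.1 nb nbr s (i + 1) r.2
  else (ph, i, k)
termination_by (nbr - (i : Int)).toNat
decreasing_by omega

def aff_ph (ph : List (List Int)) (nb : Int) (nbr : Int) (sent : String) : List (List Int) :=
  let s := sent.toList
  let r := affA_outer ph nb nbr s 0 0
  let ph' := r.1
  let iFin : Int := (r.2.1 : Int)
  -- `if (len(ph[i-1]) != nb): while (len(ph[i-1]) < nb): ph[i-1].append(0)`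
  match PySem.List.pyGet? ph' (iFin - 1) with
  | none => ph'   -- Python raises IndexError here (excluded by Pre_)
  | some row =>
      if (row.length : Int) ≠ nb then PySem.List.pySetD ph' (iFin - 1) (affA_pad row nb) else ph'

-- ===== PORT B =====
-- body of `for i in range(nbr)`: optional append of [], extend row i with the slice sent[k:k+max(nb,0)]
def affB_step (nbr : Int) (s : List Char) (nb : Int) (st : List (List Int) × Nat) (i : Int) :
    List (List Int) × Nat :=
  let ph1 := if (st.1.length : Int) ≠ nbr then st.1 ++ [([] : List Int)] else st.1
  let chunk := PySem.List.slice s (some (st.2 : Int)) (some ((st.2 : Int) + max nb 0))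
  (ph1.modify i.toNat (fun row => row ++ chunk.map (fun c => (c.toNat : Int))), st.2 + chunk.length)

def aff_ph_alt (ph : List (List Int)) (nb : Int) (nbr : Int) (sent : String) : List (List Int) :=
  let s := sent.toList
  let r := (PySem.List.pyRange 0 nbr 1).foldl (affB_step nbr s nb) (ph, 0)
  let ph' := r.1
  -- `last = ph[nbr-1]; if len(last) < nb: last.extend([0] * (nb - len(last)))`
  match PySem.List.pyGet? ph' (nbr - 1) with
  | none => ph'   -- IndexError, excluded by Pre_
  | some last =>
      if (last.length : Int) < nb then
        PySem.List.pySetD ph' (nbr - 1) (last ++ List.replicate (nb - last.length).toNat 0)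
      else ph'

-- ===== PRECONDITION & SPEC =====
-- Pre_ excludes negative nbr — there A reaches ph[i-1] with i = 0, so it either raises IndexError
-- (ph empty) or pads the row picked by accidental negative-index wraparound (ph[-1]) while B's
-- natural ph[nbr-1] picks another row — and the nbr = 0, ph = [] case, where both raise IndexError.
def Pre_aff_ph (ph : List (List Int)) (nb : Int) (nbr : Int) (sent : String) : Prop :=
  0 ≤ nbr ∧ (1 ≤ nbr ∨ ph ≠ [])
instance (ph : List (List Int)) (nb : Int) (nbr : Int) (sent : String) :
    Decidable (Pre_aff_ph ph nb nbr sent) := by unfold Pre_aff_ph; infer_instance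

def pvWitness_aff_ph : List (List Int) × Int × Int × String := ([], 3, 2, "abcd")

def Spec_aff_ph (ph : List (List Int)) (nb : Int) (nbr : Int) (sent : String) (out : List (List Int)) : Prop := out = aff_ph_alt ph nb nbr sent
instance (ph : List (List Int)) (nb : Int) (nbr : Int) (sent : String) (out : List (List Int)) : Decidable (Spec_aff_ph ph nb nbr sent out) := by unfold Spec_aff_ph; infer_instance

-- ===== CLAIM (what is proved, stated in full; the proofs are below) =====
def Claim_equal_aff_ph : Prop := ∀ (ph : List (List Int)) (nb : Int) (nbr : Int) (sent : String), Dom_aff_ph ph nb nbr sent → Pre_aff_ph ph nb nbr sent → Spec_aff_ph ph nb nbr sent (aff_ph ph nb nbr sent)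

-- ===== LEMMAS AND PROOFS =====

theorem modify_modify (xs : List (List Int)) (i : Nat) (f g : List Int → List Int) :
    (xs.modify i f).modify i g = xs.modify i (fun r => g (f r)) := by
  induction xs generalizing i with
  | nil => simp
  | cons x xs ih =>
      cases i with
      | zero => simp [List.modify]
      | succ n => simp [List.modify_succ_cons, ih n]

theorem modify_id' (ph : List (List Int)) (i : Nat) : ph.modify i (fun row => row) = ph := by
  induction ph generalizing i with
  | nil => simp
  | cons x xs ih => cases i with
    | zero => simp [List.modify]
    | succ n => simp [List.modify_succ_cons, ih n]

-- the inner while appends exactly the next min(nb-j, len(s)-k) characters of s to row i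
theorem affA_inner_eq (s : List Char) (i : Nat) (nb : Int) :
    ∀ (j : Int) (k : Nat) (ph : List (List Int)),
    affA_inner ph i nb j k s =
      (ph.modify i (fun row => row ++ ((s.drop k).take (nb - j).toNat).map (fun c => (c.toNat : Int))),
       k + min (nb - j).toNat (s.length - k)) := by
  intro j k ph
  fun_induction affA_inner ph i nb j k s with
  | case1 ph j k h ih =>
      rw [ih, modify_modify]
      have hd : s.drop k = s[k]'h.2 :: s.drop (k+1) := List.drop_eq_getElem_cons h.2
      have ht : (nb - j).toNat = ((nb - (j+1)).toNat) + 1 := by omega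
      rw [Prod.mk.injEq]
      refine ⟨?_, by omega⟩
      rw [ht, hd, List.take_succ_cons]
      simp
  | case2 ph j k h =>
      have : (nb - j).toNat = 0 ∨ s.length - k = 0 := by omega
      rcases this with h1 | h1
      · simp [h1, modify_id']
      · have hk2 : s.length ≤ k := by omega
        simp [h1, List.drop_eq_nil_of_le, hk2, modify_id']

-- B's slice sent[k:k+max(nb,0)] is the same chunk A's inner while consumes
theorem chunk_eq (s : List Char) (nb : Int) (k : Nat) :
    PySem.List.slice s (some (k : Int)) (some ((k : Int) + max nb 0)) = (s.drop k).take nb.toNat := by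
  rw [PySem.List.slice_toNat _ (by omega) (by omega)]
  congr 1
  omega

-- A's outer loop is B's fold over range(i, nbr), and its counter ends at max i nbr.toNat
theorem affA_outer_eq (nb nbr : Int) (s : List Char) :
    ∀ (n : Nat) (i k : Nat) (ph : List (List Int)), (nbr - (i : Int)).toNat ≤ n → k ≤ s.length →
    affA_outer ph nb nbr s i k =
      (((PySem.List.pyRange i nbr 1).foldl (affB_step nbr s nb) (ph, k)).1, max i nbr.toNat,
       ((PySem.List.pyRange i nbr 1).foldl (affB_step nbr s nb) (ph, k)).2) := by
  intro n
  induction n with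
  | zero =>
      intro i k ph hn hk
      have hge : nbr ≤ (i : Int) := by omega
      rw [affA_outer, dif_neg (by omega), PySem.List.pyRange_one_eq_nil hge]
      simp
      omega
  | succ n ih =>
      intro i k ph hn hk
      by_cases hlt : (i : Int) < nbr
      · rw [affA_outer, dif_pos hlt, PySem.List.pyRange_one_cons hlt]
        simp only [List.foldl_cons]
        have hstep : affB_step nbr s nb (ph, k) i =
            ((if (ph.length : Int) ≠ nbr then ph ++ [([] : List Int)] else ph).modify i
               (fun row => row ++ ((s.drop k).take nb.toNat).map (fun c => (c.toNat : Int))),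
             k + min nb.toNat (s.length - k)) := by
          simp only [affB_step, chunk_eq]
          simp [List.length_take, List.length_drop]
        rw [affA_inner_eq]
        simp only [Int.sub_zero]
        rw [ih _ _ _ (by omega) (by omega)]
        rw [hstep]
        have : max (i+1) nbr.toNat = max i nbr.toNat := by omega
        rw [this]
        norm_cast
      · rw [affA_outer, dif_neg hlt, PySem.List.pyRange_one_eq_nil (by omega)]
        simp
        omega

theorem affA_pad_eq (nb : Int) : ∀ (row : List Int),
    affA_pad row nb = row ++ List.replicate (nb - row.length).toNat 0 := by
  intro row
  fun_induction affA_pad row nb with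
  | case1 row h ih =>
      rw [ih]
      have : (nb - (row.length:Int)).toNat = (nb - ((row ++ [0]).length:Int)).toNat + 1 := by
        simp; omega
      rw [this, List.replicate_succ, List.append_assoc]
      simp
  | case2 row h => simp [(by omega : (nb - (row.length:Int)).toNat = 0)]

-- writing back the element just read is a no-op
theorem pySetD_self (xs : List (List Int)) (i : Int) (v : List Int)
    (h : PySem.List.pyGet? xs i = some v) : PySem.List.pySetD xs i v = xs := by
  simp [PySem.List.pySetD, PySem.List.pySet?, PySem.List.pyGet?, PySem.List.pyIdx?] at *
  split_ifs at h ⊢ with h1 h2 h3 <;> simp_all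
  · subst h; exact List.set_getElem_self (by omega)
  · have hk : xs.length - (-i).toNat < xs.length := by omega
    have : xs[xs.length - (-i).toNat] = v := by simpa [List.getElem?_eq_getElem hk] using h
    subst this; exact List.set_getElem_self hk

-- ===== VERDICT (by name: the statement is the Claim_ definition above) =====
theorem aff_ph_spec : Claim_equal_aff_ph := by
  intro ph nb nbr sent _ hpre
  obtain ⟨hnbr, -⟩ := hpre
  unfold Spec_aff_ph aff_ph aff_ph_alt
  dsimp only
  rw [affA_outer_eq nb nbr sent.toList nbr.toNat 0 0 ph (by omega) (by omega)]
  simp only [Nat.zero_max, Int.toNat_of_nonneg hnbr, Nat.cast_zero]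
  cases hget : PySem.List.pyGet? ((PySem.List.pyRange 0 nbr 1).foldl (affB_step nbr sent.toList nb) (ph, 0)).1 (nbr - 1) with
  | none => rfl
  | some row =>
      simp only []
      split_ifs with h1 h2 h2
      · rw [affA_pad_eq]
      · -- row.length > nb: A pads nothing (affA_pad returns row) and writes row back
        rw [affA_pad_eq, (by omega : (nb - (row.length:Int)).toNat = 0), List.replicate_zero,
            List.append_nil, pySetD_self _ _ _ hget]
      · omega
      · rfl
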